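-- pv_equiv track=rewrite | github.com/tommy16102/2022-algorithm-study | 2023/May/week1/이정욱/4_표현 가능한 이진트리.py | getTreeSize
-- ===== SOURCE A (Python) =====
-- def getTreeSize(l):
--     size = 2
--     while 1:
--         if l > size-1:
--             size *= 2
--         else:
--             break
--     return size-1
-- ===== SOURCE B (Python) =====
-- def getTreeSize(l):
--     if l <= 1:
--         return 1
--     return (1 << l.bit_length()) - 1
-- ===== Notes on version B (the rewrite author's own statement) =====
-- stated objective: faster
-- what changed: Replaced the doubling while-loop with a closed form: for l<=1 return 1, otherwise (1 << l.bit_length()) - 1.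
import Mathlib
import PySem

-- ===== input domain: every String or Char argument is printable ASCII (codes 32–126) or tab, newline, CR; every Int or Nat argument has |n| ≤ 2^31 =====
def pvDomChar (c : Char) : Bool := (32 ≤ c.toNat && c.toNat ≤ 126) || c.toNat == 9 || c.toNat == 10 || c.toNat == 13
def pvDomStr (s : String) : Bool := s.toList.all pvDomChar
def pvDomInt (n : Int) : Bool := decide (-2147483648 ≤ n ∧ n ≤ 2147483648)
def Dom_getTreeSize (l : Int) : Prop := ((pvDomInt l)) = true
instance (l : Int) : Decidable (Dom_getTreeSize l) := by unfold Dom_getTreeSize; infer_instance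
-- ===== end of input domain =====

-- B replaces A's doubling loop by the closed form (1 << l.bit_length()) - 1 (guarded for l ≤ 1): O(1) arithmetic instead of the iteration.

-- ===== PORT A =====
-- the 'while 1: if l > size-1: size *= 2 else: break' loop; size stays a positive power of 2
def getTreeSizeLoop (l : Int) (size : Nat) (h : 0 < size) : Nat :=
  if l > (size : Int) - 1 then getTreeSizeLoop l (size * 2) (by omega) else size
termination_by l.toNat + 1 - size
decreasing_by
  have : (size : Int) ≤ l := by omega
  have : size ≤ l.toNat := by omega
  omega

def getTreeSize (l : Int) : Int := (getTreeSizeLoop l 2 (by omega) : Int) - 1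

-- ===== PORT B =====
-- l.bit_length() for l ≥ 1 is Nat.log2 + 1
def getTreeSize_alt (l : Int) : Int :=
  if l ≤ 1 then 1 else (2 ^ (l.toNat.log2 + 1) : Int) - 1

-- ===== PRECONDITION & SPEC =====
def Spec_getTreeSize (l : Int) (out : Int) : Prop := out = getTreeSize_alt l
instance (l : Int) (out : Int) : Decidable (Spec_getTreeSize l out) := by unfold Spec_getTreeSize; infer_instance

-- ===== CLAIM (what is proved, stated in full; the proofs are below) =====
def Claim_equal_getTreeSize : Prop := ∀ (l : Int), Dom_getTreeSize l → Spec_getTreeSize l (getTreeSize l)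

-- ===== LEMMAS AND PROOFS =====

theorem getTreeSizeLoop_stop (l : Int) (size : Nat) (h : 0 < size) (hle : l ≤ (size : Int) - 1) :
    getTreeSizeLoop l size h = size := by
  unfold getTreeSizeLoop
  simp [show ¬ (l > (size : Int) - 1) by omega]

theorem getTreeSizeLoop_pow (l : Int) (hl : 2 ≤ l) :
    ∀ (d k : Nat), 1 ≤ k → k + d = l.toNat.log2 + 1 →
      ∀ (h : 0 < 2 ^ k), getTreeSizeLoop l (2 ^ k) h = 2 ^ (l.toNat.log2 + 1) := by
  intro d
  induction d with
  | zero =>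
    intro k _ hk h
    simp only [Nat.add_zero] at hk
    subst hk
    apply getTreeSizeLoop_stop
    have hn : l.toNat < 2 ^ (l.toNat.log2 + 1) := Nat.lt_log2_self
    have : (l.toNat : Int) = l := Int.toNat_of_nonneg (by omega)
    have := (Nat.cast_lt (α := Int)).mpr hn
    push_cast at this ⊢
    omega
  | succ d ih =>
    intro k hk1 hkd h
    have hkle : k ≤ l.toNat.log2 := by omega
    have h1 : 2 ^ k ≤ l.toNat := by
      calc 2 ^ k ≤ 2 ^ l.toNat.log2 := Nat.pow_le_pow_right (by norm_num) hkle
        _ ≤ l.toNat := Nat.log2_self_le (by omega)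
    have h2 : (2 ^ k : Int) ≤ l := by
      have : ((2 ^ k : Nat) : Int) ≤ (l.toNat : Int) := by exact_mod_cast h1
      have ht : (l.toNat : Int) = l := Int.toNat_of_nonneg (by omega)
      push_cast at this
      omega
    unfold getTreeSizeLoop
    rw [if_pos (by push_cast; omega)]
    have : 2 ^ k * 2 = 2 ^ (k + 1) := by ring
    simp only [this]
    exact ih (k + 1) (by omega) (by omega) _

-- ===== VERDICT (by name: the statement is the Claim_ definition above) =====
theorem getTreeSize_spec : Claim_equal_getTreeSize := by
  intro l _
  unfold Spec_getTreeSize getTreeSize getTreeSize_alt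
  by_cases hl : l ≤ 1
  · rw [getTreeSizeLoop_stop l 2 (by omega) (by push_cast; omega)]
    simp [hl]
  · push Not at hl
    have hl2 : 2 ≤ l := by omega
    rw [if_neg (by omega)]
    have h' : ∀ (h : 0 < 2), getTreeSizeLoop l 2 h = 2 ^ (l.toNat.log2 + 1) :=
      fun h => getTreeSizeLoop_pow l hl2 l.toNat.log2 1 (by omega) (by omega) h
    rw [h']
    push_cast
    ring
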